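-- pv_equiv track=rewrite | github.com/MetPX/sarracenia | sarra/sr_config.py | backslash_space
-- ===== SOURCE A (Python) =====
-- def backslash_space(iwords):
--     words = []
--     lst   = -1
--     for w in iwords:
--         if lst >= 0 and words[lst].endswith('\\') :
--            rw =  words[lst][:-1]
--            words[lst] = rw + ' ' + w
--         else:
--            words.append(w)
--            lst += 1
--     return words
-- ===== SOURCE B (Python) =====
-- def backslash_space(iwords):
--     # Group-at-a-time: scan ahead to find the extent of each continuation group,
--     # then emit the whole group joined in one shot.
--     words = []
--     i = 0
--     n = len(iwords)
--     while i < n: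
--         j = i
--         while j + 1 < n and iwords[j].endswith('\\'):
--             j += 1
--         words.append(' '.join([w[:-1] for w in iwords[i:j]] + [iwords[j]]))
--         i = j + 1
--     return words
-- ===== Notes on version B (the rewrite author's own statement) =====
-- stated objective: alternative
-- what changed: Replaces A's word-by-word pass that repeatedly rewrites the last output element in place with a group-at-a-time algorithm: an inner scan first finds the extent of each backslash-continuation group, and the group is then emitted once as a single join of its stripped words.
import Mathlib
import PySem

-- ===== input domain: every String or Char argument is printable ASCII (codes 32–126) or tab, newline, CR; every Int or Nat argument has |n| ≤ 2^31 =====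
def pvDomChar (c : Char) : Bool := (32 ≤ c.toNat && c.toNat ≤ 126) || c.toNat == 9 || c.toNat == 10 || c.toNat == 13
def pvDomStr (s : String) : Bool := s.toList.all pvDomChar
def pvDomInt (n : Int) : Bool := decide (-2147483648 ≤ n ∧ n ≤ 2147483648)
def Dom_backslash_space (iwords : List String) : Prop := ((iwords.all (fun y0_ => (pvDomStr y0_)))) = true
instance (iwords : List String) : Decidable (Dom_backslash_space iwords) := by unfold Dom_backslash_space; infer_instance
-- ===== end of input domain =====

-- B replaces A's word-by-word pass (which repeatedly rewrites the last output element in place)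
-- with a group-at-a-time algorithm: an inner scan finds the extent of each backslash-continuation
-- group, which is then emitted once as a single join (objective: alternative, same cost).


-- ===== PORT A =====
-- loop body of A: state = (words, lst)
def pvStepA (st : List String × Int) (w : String) : List String × Int :=
  if st.2 ≥ 0 ∧ PySem.Str.endswith (PySem.List.pyGetD st.1 st.2 "") "\\" then
    let rw := PySem.Str.slice (PySem.List.pyGetD st.1 st.2 "") none (some (-1))
    (st.1.set st.2.toNat (rw ++ " " ++ w), st.2)
  else
    (st.1 ++ [w], st.2 + 1)

def backslash_space (iwords : List String) : List String :=
  (iwords.foldl pvStepA ([], -1)).1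

-- ===== PORT B =====
-- inner while loop of B: advance j while a next word exists and iwords[j] ends with '\'
def pvInnerJ (iwords : List String) (j : Nat) : Nat :=
  if h : j + 1 < iwords.length ∧ PySem.Str.endswith (iwords.getD j "") "\\" = true then
    pvInnerJ iwords (j + 1)
  else j
termination_by iwords.length - j
decreasing_by omega

-- needed by the outer loop's termination proof
theorem pvInnerJ_ge (iwords : List String) (j : Nat) : j ≤ pvInnerJ iwords j := by
  rw [pvInnerJ]
  split
  · next h => have := pvInnerJ_ge iwords (j + 1); omega
  · exact Nat.le_refl j
termination_by iwords.length - j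
decreasing_by omega

-- outer while loop of B: one output word per group; iwords[i:j] is ported via PySem.List.slice
def backslash_space_alt_go (iwords : List String) (i : Nat) : List String :=
  if h : i < iwords.length then
    let j := pvInnerJ iwords i
    (PySem.Str.join " " (((PySem.List.slice iwords (some (i : Int)) (some (j : Int))).map
        (fun w => PySem.Str.slice w none (some (-1)))) ++ [iwords.getD j ""]))
      :: backslash_space_alt_go iwords (j + 1)
  else []
termination_by iwords.length - i
decreasing_by have := pvInnerJ_ge iwords i; omega

def backslash_space_alt (iwords : List String) : List String :=
  backslash_space_alt_go iwords 0

-- ===== PRECONDITION & SPEC =====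
def Spec_backslash_space (iwords : List String) (out : List String) : Prop := out = backslash_space_alt iwords
instance (iwords : List String) (out : List String) : Decidable (Spec_backslash_space iwords out) := by unfold Spec_backslash_space; infer_instance

-- ===== CLAIM (what is proved, stated in full; the proofs are below) =====
def Claim_equal_backslash_space : Prop := ∀ (iwords : List String), Dom_backslash_space iwords → Spec_backslash_space iwords (backslash_space iwords)

-- ===== LEMMAS AND PROOFS =====

-- ---- proof-only intermediate: a single-pass accumulator fold, coupled to A on one side
-- ---- and shown equal to B's group recursion on the other.
def pvStepB (st : List String × Option String) (w : String) : List String × Option String :=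
  match st.2 with
  | some c =>
      if PySem.Str.endswith c "\\" then
        (st.1, some (PySem.Str.slice c none (some (-1)) ++ " " ++ w))
      else
        (st.1 ++ [c], some w)
  | none => (st.1, some w)

def pvFlush (st : List String × Option String) : List String :=
  match st.2 with
  | some c => st.1 ++ [c]
  | none => st.1

-- structural-recursion version of B (over the suffix list), bridged to the index loops
def pvK : List String → Nat
  | [] => 0
  | w :: rest => if rest ≠ [] ∧ PySem.Str.endswith w "\\" = true then pvK rest + 1 else 0

def pvAltS : List String → List String
  | [] => []
  | w :: rest =>
    (PySem.Str.join " " ((((w :: rest).take (pvK (w :: rest))).map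
        (fun x => PySem.Str.slice x none (some (-1)))) ++ [(w :: rest).getD (pvK (w :: rest)) ""]))
      :: pvAltS ((w :: rest).drop (pvK (w :: rest) + 1))
termination_by l => l.length
decreasing_by simp

-- ---- stage 0: string facts
theorem pvEndsSingleton (l : List Char) (c : Char) :
    PySem.Chars.endswith l [c] = (l.getLast? == some c) := by
  cases l using List.reverseRecOn with
  | nil =>
      have : ¬ PySem.Chars.endswith [] [c] = true := by
        rw [PySem.Chars.endswith_iff]; simp
      simp_all
  | append_singleton xs x =>
      by_cases h : x = c
      · subst h
        have : PySem.Chars.endswith (xs ++ [x]) [x] = true := by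
          rw [PySem.Chars.endswith_iff]; exact ⟨xs, rfl⟩
        simp_all
      · have : ¬ PySem.Chars.endswith (xs ++ [x]) [c] = true := by
          rw [PySem.Chars.endswith_iff]
          rintro ⟨t, ht⟩
          have := congrArg List.getLast? ht
          simp at this
          exact h this.symm
        simp_all

theorem pvStrEnds (s : String) :
    PySem.Str.endswith s "\\" = (s.toList.getLast? == some '\\') := by
  have : PySem.Str.endswith s "\\" = PySem.Chars.endswith s.toList "\\".toList := by simp
  rw [this]
  have : "\\".toList = ['\\'] := by decide
  rw [this, pvEndsSingleton]

theorem pvJoinSingleton (x : String) : PySem.Str.join " " [x] = x := by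
  apply String.toList_inj.mp
  simp [PySem.Chars.join_singleton]

theorem pvJoinCons (x : String) (L : List String) (h : L ≠ []) :
    PySem.Str.join " " (x :: L) = x ++ " " ++ PySem.Str.join " " L := by
  match L with
  | y :: L' =>
      apply String.toList_inj.mp
      simp [PySem.Chars.join_cons_cons]

theorem pvEndsAppend (x w2 : String) (h : w2 ≠ "") :
    PySem.Str.endswith (x ++ w2) "\\" = PySem.Str.endswith w2 "\\" := by
  rw [pvStrEnds, pvStrEnds]
  have h2 : w2.toList ≠ [] := by
    intro hc; exact h (String.toList_inj.mp (by simpa using hc))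
  simp [List.getLast?_append, List.getLast?_eq_none_iff, h2]

theorem pvEndsSpace (x : String) : PySem.Str.endswith (x ++ " ") "\\" = false := by
  rw [pvEndsAppend x " " (by decide), pvStrEnds]
  decide

theorem pvSliceAppend (x w2 : String) (h : w2 ≠ "") :
    PySem.Str.slice (x ++ w2) none (some (-1)) = x ++ PySem.Str.slice w2 none (some (-1)) := by
  apply String.toList_inj.mp
  rw [PySem.Str.slice_to_neg_one]
  have h2 : w2.toList ≠ [] := by
    intro hc; exact h (String.toList_inj.mp (by simpa using hc))
  simp [List.dropLast_append_of_ne_nil, h2, PySem.List.slice_to_neg_one]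

-- ---- stage 1: A equals the flushed accumulator fold (state coupling)
def pvCouple (a : List String × Int) (b : List String × Option String) : Prop :=
  a.1 = b.1 ++ b.2.toList ∧ a.2 = (a.1.length : Int) - 1 ∧ (b.2 = none → b.1 = [])

theorem pvStep_couple (a : List String × Int) (b : List String × Option String) (w : String)
    (h : pvCouple a b) : pvCouple (pvStepA a w) (pvStepB b w) := by
  obtain ⟨h1, h2, h3⟩ := h
  match b with
  | (acc, none) =>
      have hacc : acc = [] := h3 rfl
      subst hacc
      have hw : a.1 = [] := by simpa [Option.toList] using h1
      have hlst : a.2 = -1 := by rw [h2, hw]; simp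
      have hA : pvStepA a w = (a.1 ++ [w], a.2 + 1) := by
        simp only [pvStepA]
        rw [if_neg]; rintro ⟨hge, -⟩; omega
      refine ⟨?_, ?_, ?_⟩
      · rw [hA, hw]; simp [pvStepB, Option.toList]
      · rw [hA, hw, hlst]; simp
      · simp [pvStepB]
  | (acc, some c) =>
      have hw : a.1 = acc ++ [c] := by simpa [Option.toList] using h1
      have hlst : a.2 = (acc.length : Int) := by
        rw [h2, hw]; simp
      have hget : PySem.List.pyGetD a.1 a.2 "" = c := by
        rw [hw, hlst, PySem.List.pyGetD_natCast]
        simp [List.getD]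
      have hB : pvStepB (acc, some c) w =
          if PySem.Str.endswith c "\\" then
            (acc, some (PySem.Str.slice c none (some (-1)) ++ " " ++ w))
          else (acc ++ [c], some w) := rfl
      by_cases hend : PySem.Str.endswith c "\\" = true
      · have hA : pvStepA a w =
            (a.1.set a.2.toNat (PySem.Str.slice c none (some (-1)) ++ " " ++ w), a.2) := by
          simp only [pvStepA, hget]
          rw [if_pos ⟨by omega, hend⟩]
        have hset : a.1.set a.2.toNat (PySem.Str.slice c none (some (-1)) ++ " " ++ w)
            = acc ++ [PySem.Str.slice c none (some (-1)) ++ " " ++ w] := by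
          rw [hw, hlst]
          simp
        rw [hB, if_pos hend]
        refine ⟨?_, ?_, ?_⟩
        · rw [hA, hset]; simp [Option.toList]
        · rw [hA, hset, hlst]; simp
        · simp
      · have hA : pvStepA a w = (a.1 ++ [w], a.2 + 1) := by
          simp only [pvStepA, hget]
          rw [if_neg]; rintro ⟨-, he⟩; exact hend he
        rw [hB, if_neg hend]
        refine ⟨?_, ?_, ?_⟩
        · rw [hA, hw]; simp [Option.toList]
        · rw [hA]; simp; omega
        · simp

theorem pvFold_couple (l : List String) (a : List String × Int) (b : List String × Option String)
    (h : pvCouple a b) : pvCouple (l.foldl pvStepA a) (l.foldl pvStepB b) := by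
  induction l generalizing a b with
  | nil => simpa using h
  | cons w ws ih => exact ih _ _ (pvStep_couple a b w h)

theorem pvA_eq_flush (l : List String) :
    backslash_space l = pvFlush (l.foldl pvStepB ([], none)) := by
  unfold backslash_space
  have h := pvFold_couple l ([], -1) ([], none) (by simp [pvCouple])
  obtain ⟨h1, -, -⟩ := h
  rw [h1]
  cases hc : (l.foldl pvStepB ([], none)).2 <;> simp [pvFlush, Option.toList, hc]

-- ---- stage 2: the flushed fold equals the structural group recursion
theorem pvFold_acc (l : List String) (acc : List String) (cur : Option String) :
    l.foldl pvStepB (acc, cur)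
      = (acc ++ (l.foldl pvStepB ([], cur)).1, (l.foldl pvStepB ([], cur)).2) := by
  induction l generalizing acc cur with
  | nil => simp
  | cons w ws ih =>
      match cur with
      | none => simp only [List.foldl_cons, pvStepB]; exact ih acc (some w)
      | some c =>
          by_cases hend : PySem.Str.endswith c "\\" = true
          · simp only [List.foldl_cons, pvStepB, if_pos hend]
            exact ih acc _
          · simp only [List.foldl_cons, pvStepB, if_neg hend, List.nil_append]
            rw [ih (acc ++ [c]) (some w), ih [c] (some w)]
            simp

theorem pvFlush_acc (acc rest : List String) (cur : Option String) :
    pvFlush (acc ++ rest, cur) = acc ++ pvFlush (rest, cur) := by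
  cases cur <;> simp [pvFlush]

theorem pvF_cons_pos (c w : String) (l : List String) (h : PySem.Str.endswith c "\\" = true) :
    pvFlush ((w :: l).foldl pvStepB ([], some c))
      = pvFlush (l.foldl pvStepB ([], some (PySem.Str.slice c none (some (-1)) ++ " " ++ w))) := by
  simp only [List.foldl_cons, pvStepB, if_pos h]

theorem pvF_cons_neg (c w : String) (l : List String) (h : ¬ PySem.Str.endswith c "\\" = true) :
    pvFlush ((w :: l).foldl pvStepB ([], some c))
      = c :: pvFlush (l.foldl pvStepB ([], some w)) := by
  simp only [List.foldl_cons, pvStepB, if_neg h, List.nil_append]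
  rw [pvFold_acc l [c] (some w)]
  have := pvFlush_acc [c] (l.foldl pvStepB ([], some w)).1 (l.foldl pvStepB ([], some w)).2
  simpa using this

-- merging the first two words of a group commutes with the group recursion
theorem pvNeEmpty (w2 : String) (h : PySem.Str.endswith w2 "\\" = true) : w2 ≠ "" := by
  intro hc; subst hc; rw [pvStrEnds] at h; simp at h

theorem pvMerge (w w2 : String) (r2 : List String) (h : PySem.Str.endswith w "\\" = true) :
    pvAltS ((PySem.Str.slice w none (some (-1)) ++ " " ++ w2) :: r2) = pvAltS (w :: w2 :: r2) := by
  set c := PySem.Str.slice w none (some (-1)) ++ " " ++ w2 with hc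
  have hends : PySem.Str.endswith c "\\" = PySem.Str.endswith w2 "\\" := by
    by_cases hw2 : w2 = ""
    · subst hw2
      rw [hc]
      have : PySem.Str.slice w none (some (-1)) ++ " " ++ "" = PySem.Str.slice w none (some (-1)) ++ " " := by
        simp
      rw [this, pvEndsSpace]
      decide
    · exact pvEndsAppend (PySem.Str.slice w none (some (-1)) ++ " ") w2 hw2
  have hK : pvK (c :: r2) = pvK (w2 :: r2) := by
    simp only [pvK, hends]
  have hKw : pvK (w :: w2 :: r2) = pvK (w2 :: r2) + 1 := by
    simp only [pvK]
    rw [if_pos ⟨by simp, h⟩]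
  conv_lhs => rw [pvAltS]
  conv_rhs => rw [pvAltS]
  simp only [hK, hKw]
  rcases hk' : pvK (w2 :: r2) with _ | k''
  · simp only [List.take_zero, List.take_succ_cons, List.map_nil, List.map_cons,
      List.nil_append, List.getD_cons_zero, List.getD_cons_succ, List.drop_succ_cons,
      List.drop_zero, List.singleton_append]
    rw [pvJoinCons _ [w2] (by simp), pvJoinSingleton, pvJoinSingleton, hc]
  · have hcond : r2 ≠ [] ∧ PySem.Str.endswith w2 "\\" = true ∧ pvK r2 = k'' := by
      by_cases hcnd : r2 ≠ [] ∧ PySem.Str.endswith w2 "\\" = true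
      · refine ⟨hcnd.1, hcnd.2, ?_⟩
        simp only [pvK, if_pos hcnd] at hk'
        omega
      · simp only [pvK, if_neg hcnd] at hk'
        omega
    obtain ⟨-, hw2e, -⟩ := hcond
    have hw2ne : w2 ≠ "" := pvNeEmpty w2 hw2e
    have hsl : PySem.Str.slice c none (some (-1))
        = PySem.Str.slice w none (some (-1)) ++ " " ++ PySem.Str.slice w2 none (some (-1)) := by
      rw [hc]
      exact pvSliceAppend (PySem.Str.slice w none (some (-1)) ++ " ") w2 hw2ne
    simp only [List.take_succ_cons, List.map_cons, List.getD_cons_succ, List.drop_succ_cons,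
      List.cons_append]
    rw [List.cons.injEq]
    refine ⟨?_, rfl⟩
    rw [pvJoinCons _ _ (by simp), pvJoinCons _ _ (by simp),
        pvJoinCons (PySem.Str.slice w2 none (some (-1))) _ (by simp), hsl]
    apply String.toList_inj.mp
    simp

theorem pvF_eq_altS (l : List String) (w : String) :
    pvFlush (l.foldl pvStepB ([], some w)) = pvAltS (w :: l) := by
  induction l generalizing w with
  | nil =>
      rw [pvAltS]
      simp [pvFlush, pvK, pvJoinSingleton, pvAltS]
  | cons w2 r2 ih =>
      by_cases hend : PySem.Str.endswith w "\\" = true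
      · rw [pvF_cons_pos w w2 r2 hend, ih, pvMerge w w2 r2 hend]
      · rw [pvF_cons_neg w w2 r2 hend, ih]
        have hk : pvK (w :: w2 :: r2) = 0 := by
          simp only [pvK]
          rw [if_neg]; rintro ⟨-, h2⟩; exact hend h2
        conv_rhs => rw [pvAltS]
        simp [hk, pvJoinSingleton]

-- ---- stage 3: bridge B's index loops to the structural recursion
theorem pvInnerJ_eq (iwords : List String) (i : Nat) :
    pvInnerJ iwords i = i + pvK (iwords.drop i) := by
  rw [pvInnerJ]
  split
  · next h =>
      obtain ⟨hlt, hend⟩ := h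
      have hi : i < iwords.length := by omega
      have hd : iwords.drop i = iwords[i] :: iwords.drop (i + 1) :=
        List.drop_eq_getElem_cons hi
      have hgd : iwords.getD i "" = iwords[i] := List.getD_eq_getElem iwords "" hi
      have hne : iwords.drop (i + 1) ≠ [] := by
        intro hc
        have := congrArg List.length hc
        simp at this
        omega
      rw [pvInnerJ_eq iwords (i + 1), hd, pvK]
      rw [if_pos ⟨hne, by rwa [← hgd]⟩]
      omega
  · next h =>
      by_cases hi : i < iwords.length
      · have hd : iwords.drop i = iwords[i] :: iwords.drop (i + 1) :=
          List.drop_eq_getElem_cons hi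
        have hgd : iwords.getD i "" = iwords[i] := List.getD_eq_getElem iwords "" hi
        rw [hd, pvK, if_neg]
        · omega
        · rintro ⟨hne, hend⟩
          apply h
          refine ⟨?_, by rwa [hgd]⟩
          by_contra hlen
          exact hne (List.drop_eq_nil_of_le (by omega))
      · rw [List.drop_eq_nil_of_le (by omega), pvK]
        omega
termination_by iwords.length - i
decreasing_by omega

theorem pvGo_eq_altS (iwords : List String) (i : Nat) :
    backslash_space_alt_go iwords i = pvAltS (iwords.drop i) := by
  by_cases hi : i < iwords.length
  ·
      have hd : iwords.drop i = iwords[i] :: iwords.drop (i + 1) :=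
        List.drop_eq_getElem_cons hi
      have hj := pvInnerJ_eq iwords i
      set k := pvK (iwords.drop i) with hk
      have hslice : PySem.List.slice iwords (some (i : Int)) (some ((pvInnerJ iwords i) : Int))
          = (iwords.drop i).take k := by
        rw [hj, PySem.List.slice_natCast]
        congr 1
        omega
      have hgd : iwords.getD (pvInnerJ iwords i) "" = (iwords.drop i).getD k "" := by
        rw [hj]
        simp [List.getD_eq_getElem?_getD, List.getElem?_drop]
      have hdrop : iwords.drop (pvInnerJ iwords i + 1) = (iwords.drop i).drop (k + 1) := by
        rw [hj, List.drop_drop]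
        congr 1
      conv_lhs => rw [backslash_space_alt_go]
      simp only [dif_pos hi]
      conv_rhs => rw [hd, pvAltS, ← hd]
      rw [pvGo_eq_altS iwords (pvInnerJ iwords i + 1)]
      simp only [hslice, hgd, hdrop, hk]
  · rw [backslash_space_alt_go, dif_neg hi, List.drop_eq_nil_of_le (by omega), pvAltS]
termination_by iwords.length - i
decreasing_by have := pvInnerJ_ge iwords i; omega

-- ===== VERDICT (by name: the statement is the Claim_ definition above) =====
theorem backslash_space_spec : Claim_equal_backslash_space := by
  intro iwords _
  unfold Spec_backslash_space
  rw [pvA_eq_flush, backslash_space_alt, pvGo_eq_altS]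
  simp only [List.drop_zero]
  match iwords with
  | [] => simp [pvFlush, pvAltS]
  | w :: rest =>
      rw [← pvF_eq_altS rest w]
      simp only [List.foldl_cons, pvStepB]
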